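-- pv_equiv track=rewrite | github.com/practual/cartographers | game.py | wildholds
-- ===== SOURCE A (Python) =====
-- def _make_coord_adjacents(coord):
--     adjacents = set()
--     x, y = coord
--     if x > 0:
--         adjacents.add((x - 1, y))
--     if y > 0:
--         adjacents.add((x, y - 1))
--     if x < 10:
--         adjacents.add((x + 1, y))
--     if y < 10:
--         adjacents.add((x, y + 1))
--     return adjacents
--
-- def _wildholds_find_cluster(coords_to_terrain, coord, checked_coords, cluster_coords):
--     for adjacent in _make_coord_adjacents(coord):
--         if adjacent in checked_coords or adjacent not in coords_to_terrain:
--             continue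
--         checked_coords.add(adjacent)
--         if coords_to_terrain[adjacent] == 'village':
--             cluster_coords.add(adjacent)
--             _wildholds_find_cluster(coords_to_terrain, adjacent, checked_coords, cluster_coords)
--
-- def wildholds(coords_to_terrain, terrain_to_coords):
--     score = 0
--     checked_coords = set()
--     for village_space in terrain_to_coords['village']:
--         if village_space in checked_coords:
--             continue
--         village_cluster = {village_space}
--         _wildholds_find_cluster(coords_to_terrain, village_space, checked_coords, village_cluster)
--         if len(village_cluster) >= 6:
--             score += 8
--     return score
-- ===== SOURCE B (Python) =====
-- # Iterative re-implementation: explicit stack of pending-neighbor frames instead of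
-- # recursion (and no set-valued adjacency helper); same scoring rule.
-- def _neighbors(coord):
--     x, y = coord
--     nbrs = []
--     if x > 0:
--         nbrs.append((x - 1, y))
--     if y > 0:
--         nbrs.append((x, y - 1))
--     if x < 10:
--         nbrs.append((x + 1, y))
--     if y < 10:
--         nbrs.append((x, y + 1))
--     return nbrs
--
-- def wildholds(coords_to_terrain, terrain_to_coords):
--     score = 0
--     checked = set()
--     for start in terrain_to_coords['village']:
--         if start in checked:
--             continue
--         cluster = {start}
--         stack = [_neighbors(start)]
--         while stack:
--             if not stack[-1]:
--                 stack.pop()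
--                 continue
--             a = stack[-1].pop(0)
--             if a in checked or a not in coords_to_terrain:
--                 continue
--             checked.add(a)
--             if coords_to_terrain[a] == 'village':
--                 cluster.add(a)
--                 stack.append(_neighbors(a))
--         if len(cluster) >= 6:
--             score += 8
--     return score
-- ===== Notes on version B (the rewrite author's own statement) =====
-- stated objective: alternative
-- what changed: Replaces the mutually recursive DFS (helper building a neighbour set, recursive cluster search threading two mutable sets) with a single iterative loop over an explicit stack of pending-neighbour frames, so no recursion and no set-valued adjacency helper.
import Mathlib
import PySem

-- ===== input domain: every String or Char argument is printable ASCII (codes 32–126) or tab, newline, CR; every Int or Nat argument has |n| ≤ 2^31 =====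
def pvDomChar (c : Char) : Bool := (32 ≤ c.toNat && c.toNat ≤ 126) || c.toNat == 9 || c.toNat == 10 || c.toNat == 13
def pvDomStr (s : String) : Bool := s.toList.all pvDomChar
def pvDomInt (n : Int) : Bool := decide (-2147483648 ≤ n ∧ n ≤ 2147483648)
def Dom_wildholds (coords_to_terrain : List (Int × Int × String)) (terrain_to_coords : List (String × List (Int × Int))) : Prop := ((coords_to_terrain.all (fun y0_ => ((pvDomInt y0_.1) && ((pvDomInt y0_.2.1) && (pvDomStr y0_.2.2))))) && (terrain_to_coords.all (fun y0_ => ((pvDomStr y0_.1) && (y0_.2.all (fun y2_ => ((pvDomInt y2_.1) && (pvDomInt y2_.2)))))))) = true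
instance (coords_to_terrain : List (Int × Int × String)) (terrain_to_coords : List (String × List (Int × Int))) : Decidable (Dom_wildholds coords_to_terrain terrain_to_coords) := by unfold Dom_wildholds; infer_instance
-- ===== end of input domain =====

-- B replaces A's mutually recursive depth-first cluster search with one iterative loop over an
-- explicit stack of pending-neighbour frames (objective: alternative; same asymptotic cost).
-- A's python iterates a 4-element Python set of neighbours (hash order); the final score is
-- order-independent, and both ports iterate the neighbours in insertion order.

-- ===== PORT A =====
-- set of adjacent coords, built exactly as _make_coord_adjacents does
def adjA (c : Int × Int) : PySem.Set (Int × Int) :=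
  let s : PySem.Set (Int × Int) := PySem.Set.empty
  let s := if c.1 > 0 then PySem.Set.add s (c.1 - 1, c.2) else s
  let s := if c.2 > 0 then PySem.Set.add s (c.1, c.2 - 1) else s
  let s := if c.1 < 10 then PySem.Set.add s (c.1 + 1, c.2) else s
  let s := if c.2 < 10 then PySem.Set.add s (c.1, c.2 + 1) else s
  s

-- _wildholds_find_cluster's `for adjacent in adjacents` loop; `recurse` is the recursive call
def fcGoA (d : PySem.Dict (Int × Int) String)
    (recurse : Int × Int → PySem.Set (Int × Int) → PySem.Set (Int × Int) →
      PySem.Set (Int × Int) × PySem.Set (Int × Int)) :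
    List (Int × Int) → PySem.Set (Int × Int) → PySem.Set (Int × Int) →
    PySem.Set (Int × Int) × PySem.Set (Int × Int)
  | [], ch, cl => (ch, cl)
  | a :: rest, ch, cl =>
    if PySem.Set.contains ch a || !(d.contains a) then
      fcGoA d recurse rest ch cl
    else
      let ch1 := PySem.Set.add ch a
      if d.get? a == some "village" then
        let r := recurse a ch1 (PySem.Set.add cl a)
        fcGoA d recurse rest r.1 r.2
      else fcGoA d recurse rest ch1 cl

-- _wildholds_find_cluster itself; the Nat is recursion-depth fuel only (each nested call starts
-- at a freshly checked key of the dict, so the initial fuel coords_to_terrain.length + 1 is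
-- never exhausted)
def fcRecA (d : PySem.Dict (Int × Int) String) :
    Nat → Int × Int → PySem.Set (Int × Int) → PySem.Set (Int × Int) →
    PySem.Set (Int × Int) × PySem.Set (Int × Int)
  | 0, _, ch, cl => (ch, cl)
  | f + 1, c, ch, cl => fcGoA d (fcRecA d f) (adjA c) ch cl

def wildholds (coords_to_terrain : List (Int × Int × String)) (terrain_to_coords : List (String × List (Int × Int))) : Int :=
  let d : PySem.Dict (Int × Int) String :=
    PySem.Dict.ofList (coords_to_terrain.map (fun t => ((t.1, t.2.1), t.2.2)))
  let tt : PySem.Dict String (List (Int × Int)) := PySem.Dict.ofList terrain_to_coords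
  let fuel := coords_to_terrain.length + 1
  ((tt.getD "village" []).foldl
    (fun (st : Int × PySem.Set (Int × Int)) v =>
      if PySem.Set.contains st.2 v then st
      else
        let r := fcGoA d (fcRecA d fuel) (adjA v) st.2 (PySem.Set.add PySem.Set.empty v)
        if 6 ≤ PySem.Set.len r.2 then (st.1 + 8, r.1) else (st.1, r.1))
    (0, PySem.Set.empty)).1

-- ===== PORT B =====
-- _neighbors: plain list, same four candidates in order
def nbrsB (c : Int × Int) : List (Int × Int) :=
  (if c.1 > 0 then [(c.1 - 1, c.2)] else []) ++
  (if c.2 > 0 then [(c.1, c.2 - 1)] else []) ++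
  (if c.1 < 10 then [(c.1 + 1, c.2)] else []) ++
  (if c.2 < 10 then [(c.1, c.2 + 1)] else [])

-- the `while stack:` loop; the stack holds pending-neighbour frames. The two Nats only guard
-- termination (a global gas counter, and per-frame depth fuel matching A's); with the initial
-- values passed by wildholds_alt neither ever runs out.
def machB (d : PySem.Dict (Int × Int) String) :
    Nat → List (Nat × List (Int × Int)) → PySem.Set (Int × Int) → PySem.Set (Int × Int) →
    PySem.Set (Int × Int) × PySem.Set (Int × Int)
  | 0, _, ch, cl => (ch, cl)
  | _ + 1, [], ch, cl => (ch, cl)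
  | g + 1, (_, []) :: st, ch, cl => machB d g st ch cl
  | g + 1, (f, a :: rest) :: st, ch, cl =>
    if PySem.Set.contains ch a || !(d.contains a) then
      machB d g ((f, rest) :: st) ch cl
    else
      let ch1 := PySem.Set.add ch a
      if d.get? a == some "village" then
        let cl1 := PySem.Set.add cl a
        match f with
        | 0 => machB d g ((0, rest) :: st) ch1 cl1
        | f' + 1 => machB d g ((f', nbrsB a) :: (f' + 1, rest) :: st) ch1 cl1
      else machB d g ((f, rest) :: st) ch1 cl

def wildholds_alt (coords_to_terrain : List (Int × Int × String)) (terrain_to_coords : List (String × List (Int × Int))) : Int :=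
  let d : PySem.Dict (Int × Int) String :=
    PySem.Dict.ofList (coords_to_terrain.map (fun t => ((t.1, t.2.1), t.2.2)))
  let tt : PySem.Dict String (List (Int × Int)) := PySem.Dict.ofList terrain_to_coords
  let fuel := coords_to_terrain.length + 1
  let gas := 6 ^ (fuel + 1)
  ((tt.getD "village" []).foldl
    (fun (st : Int × PySem.Set (Int × Int)) v =>
      if PySem.Set.contains st.2 v then st
      else
        let r := machB d gas [(fuel, nbrsB v)] st.2 (PySem.Set.add PySem.Set.empty v)
        if 6 ≤ PySem.Set.len r.2 then (st.1 + 8, r.1) else (st.1, r.1))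
    (0, PySem.Set.empty)).1

-- ===== PRECONDITION & SPEC =====
-- A raises KeyError when 'village' is missing from terrain_to_coords; Pre_ requires that key.
def Pre_wildholds (coords_to_terrain : List (Int × Int × String)) (terrain_to_coords : List (String × List (Int × Int))) : Prop :=
  ∃ p ∈ terrain_to_coords, p.1 = "village"
instance (coords_to_terrain : List (Int × Int × String)) (terrain_to_coords : List (String × List (Int × Int))) : Decidable (Pre_wildholds coords_to_terrain terrain_to_coords) := by unfold Pre_wildholds; infer_instance
def pvWitness_wildholds : (List (Int × Int × String)) × (List (String × List (Int × Int))) :=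
  ([((1 : Int), (1 : Int), "village")], [("village", [((1 : Int), (1 : Int))])])

def Spec_wildholds (coords_to_terrain : List (Int × Int × String)) (terrain_to_coords : List (String × List (Int × Int))) (out : Int) : Prop := out = wildholds_alt coords_to_terrain terrain_to_coords
instance (coords_to_terrain : List (Int × Int × String)) (terrain_to_coords : List (String × List (Int × Int))) (out : Int) : Decidable (Spec_wildholds coords_to_terrain terrain_to_coords out) := by unfold Spec_wildholds; infer_instance

-- ===== CLAIM (what is proved, stated in full; the proofs are below) =====
def Claim_equal_wildholds : Prop := ∀ (coords_to_terrain : List (Int × Int × String)) (terrain_to_coords : List (String × List (Int × Int))), Dom_wildholds coords_to_terrain terrain_to_coords → Pre_wildholds coords_to_terrain terrain_to_coords → Spec_wildholds coords_to_terrain terrain_to_coords (wildholds coords_to_terrain terrain_to_coords)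

-- ===== LEMMAS AND PROOFS =====

-- the two adjacency helpers produce the same list (the four candidates are pairwise distinct)
lemma adjA_eq_nbrsB (c : Int × Int) : adjA c = nbrsB c := by
  unfold adjA nbrsB
  obtain ⟨x, y⟩ := c
  have e1 : x + 1 ≠ x - 1 := by omega
  have e2 : x + 1 ≠ x := by omega
  have e3 : x ≠ x - 1 := by omega
  have e4 : x ≠ x + 1 := by omega
  have e5 : y + 1 ≠ y - 1 := by omega
  have e6 : y + 1 ≠ y := by omega
  have e7 : y ≠ y - 1 := by omega
  dsimp
  split_ifs <;>
    simp [PySem.Set.add, PySem.Set.contains, Prod.ext_iff, e1, e2, e3, e4, e5, e6, e7]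

lemma nbrsB_len_le (c : Int × Int) : (nbrsB c).length ≤ 4 := by
  unfold nbrsB
  split_ifs <;> simp

-- the termination measure of a machine stack: frames weighted by pending length and depth fuel
def pvMu (st : List (Nat × List (Int × Int))) : Nat :=
  (st.map (fun fp => (fp.2.length + 1) * 6 ^ fp.1)).sum

lemma pvMu_nil : pvMu [] = 0 := rfl

lemma pvMu_cons (f : Nat) (p : List (Int × Int)) (st : List (Nat × List (Int × Int))) :
    pvMu ((f, p) :: st) = (p.length + 1) * 6 ^ f + pvMu st := by
  simp [pvMu]

lemma pvMu_cons_pos (f : Nat) (p : List (Int × Int)) (st : List (Nat × List (Int × Int))) :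
    0 < pvMu ((f, p) :: st) := by
  rw [pvMu_cons]
  have hp : 0 < 6 ^ f := Nat.pow_pos (by omega)
  nlinarith

lemma pvMu_pop (f : Nat) (st : List (Nat × List (Int × Int))) :
    pvMu st < pvMu ((f, []) :: st) := by
  rw [pvMu_cons]
  simp


lemma pvMu_skip (f : Nat) (a : Int × Int) (rest : List (Int × Int))
    (st : List (Nat × List (Int × Int))) :
    pvMu ((f, rest) :: st) < pvMu ((f, a :: rest) :: st) := by
  rw [pvMu_cons, pvMu_cons]
  simp

lemma pvMu_push (f : Nat) (a : Int × Int) (rest : List (Int × Int))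
    (st : List (Nat × List (Int × Int))) :
    pvMu ((f, nbrsB a) :: (f + 1, rest) :: st) < pvMu ((f + 1, a :: rest) :: st) := by
  rw [pvMu_cons, pvMu_cons, pvMu_cons]
  have h4 : (nbrsB a).length ≤ 4 := nbrsB_len_le a
  have hp : 0 < 6 ^ f := Nat.pow_pos (by omega)
  have h6 : (6 : Nat) ^ (f + 1) = 6 * 6 ^ f := by ring
  simp
  nlinarith

lemma pvMu_eq_zero (st : List (Nat × List (Int × Int))) (h : pvMu st = 0) : st = [] := by
  cases st with
  | nil => rfl
  | cons fp st' =>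
    obtain ⟨f, p⟩ := fp
    exact absurd h (by have := pvMu_cons_pos f p st'; omega)

-- with enough gas the machine's result does not depend on the gas
lemma machB_gas (d : PySem.Dict (Int × Int) String) :
    ∀ (g₁ g₂ : Nat) (st : List (Nat × List (Int × Int)))
      (ch cl : PySem.Set (Int × Int)),
      pvMu st ≤ g₁ → pvMu st ≤ g₂ →
      machB d g₁ st ch cl = machB d g₂ st ch cl := by
  intro g₁
  induction g₁ with
  | zero =>
    intro g₂ st ch cl h1 _
    have hst : st = [] := pvMu_eq_zero st (by omega)
    subst hst
    cases g₂ <;> rfl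
  | succ h₁ ih =>
    intro g₂ st ch cl h1 h2
    cases st with
    | nil => cases g₂ <;> rfl
    | cons fp st' =>
      obtain ⟨f, p⟩ := fp
      have hpos := pvMu_cons_pos f p st'
      cases g₂ with
      | zero => omega
      | succ k =>
        cases p with
        | nil =>
          simp only [machB]
          exact ih k st' ch cl (by have := pvMu_pop f st'; omega)
            (by have := pvMu_pop f st'; omega)
        | cons a rest =>
          by_cases hc : (PySem.Set.contains ch a || !(d.contains a)) = true
          · simp only [machB, hc, if_true]
            exact ih k ((f, rest) :: st') ch cl
              (by have := pvMu_skip f a rest st'; omega)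
              (by have := pvMu_skip f a rest st'; omega)
          · rw [Bool.not_eq_true] at hc
            by_cases hv : (d.get? a == some "village") = true
            · cases f with
              | zero =>
                simp only [machB, hc, Bool.false_eq_true, if_false, hv, if_true]
                exact ih k ((0, rest) :: st') (PySem.Set.add ch a) (PySem.Set.add cl a)
                  (by have := pvMu_skip 0 a rest st'; omega)
                  (by have := pvMu_skip 0 a rest st'; omega)
              | succ f' =>
                simp only [machB, hc, Bool.false_eq_true, if_false, hv, if_true]
                exact ih k ((f', nbrsB a) :: (f' + 1, rest) :: st')
                  (PySem.Set.add ch a) (PySem.Set.add cl a)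
                  (by have := pvMu_push f' a rest st'; omega)
                  (by have := pvMu_push f' a rest st'; omega)
            · rw [Bool.not_eq_true] at hv
              simp only [machB, hc, hv, Bool.false_eq_true, if_false]
              exact ih k ((f, rest) :: st') (PySem.Set.add ch a) cl
                (by have := pvMu_skip f a rest st'; omega)
                (by have := pvMu_skip f a rest st'; omega)

-- running the machine with a frame on top = finishing that frame with A's recursive search,
-- then the rest of the stack
lemma machB_sim (d : PySem.Dict (Int × Int) String) :
    ∀ (f : Nat) (p : List (Int × Int)) (st : List (Nat × List (Int × Int)))
      (ch cl : PySem.Set (Int × Int)) (g : Nat),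
      pvMu ((f, p) :: st) ≤ g →
      machB d g ((f, p) :: st) ch cl =
        machB d (pvMu st) st (fcGoA d (fcRecA d f) p ch cl).1 (fcGoA d (fcRecA d f) p ch cl).2 := by
  intro f
  induction f using Nat.strong_induction_on with
  | _ f ihf =>
    intro p
    induction p with
    | nil =>
      intro st ch cl g hg
      have hpos := pvMu_cons_pos f ([] : List (Int × Int)) st
      obtain ⟨g', rfl⟩ : ∃ g', g = g' + 1 := ⟨g - 1, by omega⟩
      simp only [machB, fcGoA]
      exact machB_gas d g' (pvMu st) st ch cl
        (by have := pvMu_pop f st; omega) (Nat.le_refl _)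
    | cons a rest ihp =>
      intro st ch cl g hg
      have hpos := pvMu_cons_pos f (a :: rest) st
      obtain ⟨g', rfl⟩ : ∃ g', g = g' + 1 := ⟨g - 1, by omega⟩
      by_cases hc : (PySem.Set.contains ch a || !(d.contains a)) = true
      · simp only [machB, fcGoA, hc, if_true]
        exact ihp st ch cl g' (by have := pvMu_skip f a rest st; omega)
      · rw [Bool.not_eq_true] at hc
        by_cases hv : (d.get? a == some "village") = true
        · cases f with
          | zero =>
            simp only [machB, fcGoA, fcRecA, hc, Bool.false_eq_true, if_false, hv, if_true]
            exact ihp st (PySem.Set.add ch a) (PySem.Set.add cl a) g'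
              (by have := pvMu_skip 0 a rest st; omega)
          | succ f' =>
            simp only [machB, fcGoA, hc, Bool.false_eq_true, if_false, hv, if_true]
            rw [ihf f' (Nat.lt_succ_self f') (nbrsB a) ((f' + 1, rest) :: st)
              (PySem.Set.add ch a) (PySem.Set.add cl a) g'
              (by have := pvMu_push f' a rest st; omega)]
            rw [ihp st _ _ (pvMu ((f' + 1, rest) :: st)) (Nat.le_refl _)]
            simp only [fcRecA, adjA_eq_nbrsB]
        · rw [Bool.not_eq_true] at hv
          simp only [machB, fcGoA, hc, hv, Bool.false_eq_true, if_false]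
          exact ihp st (PySem.Set.add ch a) cl g'
            (by have := pvMu_skip f a rest st; omega)

-- starting the machine on a single frame computes exactly A's recursive cluster search
lemma machB_single (d : PySem.Dict (Int × Int) String) (f : Nat) (v : Int × Int)
    (ch cl : PySem.Set (Int × Int)) :
    machB d (6 ^ (f + 1)) [(f, nbrsB v)] ch cl = fcGoA d (fcRecA d f) (nbrsB v) ch cl := by
  have hb : pvMu [(f, nbrsB v)] ≤ 6 ^ (f + 1) := by
    rw [pvMu_cons, pvMu_nil]
    have h4 : (nbrsB v).length ≤ 4 := nbrsB_len_le v
    have hp : 0 < 6 ^ f := Nat.pow_pos (by omega)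
    have h6 : (6 : Nat) ^ (f + 1) = 6 * 6 ^ f := by ring
    nlinarith
  rw [machB_sim d f (nbrsB v) [] ch cl _ hb]
  simp [pvMu_nil, machB]

-- ===== VERDICT (by name: the statement is the Claim_ definition above) =====
theorem wildholds_spec : Claim_equal_wildholds := by
  intro ctt ttc _ _
  unfold Spec_wildholds wildholds wildholds_alt
  dsimp only
  congr 1
  congr 1
  funext st v
  rw [machB_single]
  rw [adjA_eq_nbrsB]
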